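-- pv_equiv track=rewrite | github.com/Ashiq-am/Path-of-Python | 3.Data Types/Arrays Set 1 and Set 2/Prefix/Queries to find the maximum and minimum array elements excluding elements from a given range/Queries to find the maximum and minimum array elements excluding elements from a given range.py | prefixArr
-- ===== SOURCE A (Python) =====
-- def prefixArr(arr, prefix, N):
--
-- 	# Traverse the array
-- 	for i in range(N):
-- 		if (i == 0):
-- 			prefix[i][0] = arr[i]
-- 			prefix[i][1] = arr[i]
--
-- 		else:
--
-- 			# Compare current value with maximum
-- 			# and minimum values up to previous index
-- 			prefix[i][0] = max(prefix[i - 1][0], arr[i])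
-- 			prefix[i][1] = min(prefix[i - 1][1], arr[i])
-- 	return prefix
-- ===== SOURCE B (Python) =====
-- def prefixArr(arr, prefix, N):
--     # Divide and conquer: compute (max, min)-prefix pairs of a block recursively,
--     # combining the right half with the left half's total, then write the pairs out.
--     def pm(t):
--         n = len(t)
--         if n <= 1:
--             return [(x, x) for x in t]
--         mid = n // 2
--         left = pm(t[:mid])
--         right = pm(t[mid:])
--         hi, lo = left[-1]
--         return left + [(max(hi, h), min(lo, l)) for (h, l) in right]
--     vals = pm(arr[:N])
--     for i in range(N):
--         prefix[i][0] = vals[i][0]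
--         prefix[i][1] = vals[i][1]
--     return prefix
-- ===== Notes on version B (the rewrite author's own statement) =====
-- stated objective: alternative
-- what changed: Replaced A's in-place running-max/min recurrence reading prefix[i-1] with a divide-and-conquer routine that recursively computes the (max,min)-prefix pairs of each half and merges the right half with the left half's total, followed by a separate write pass into prefix.
import Mathlib
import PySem

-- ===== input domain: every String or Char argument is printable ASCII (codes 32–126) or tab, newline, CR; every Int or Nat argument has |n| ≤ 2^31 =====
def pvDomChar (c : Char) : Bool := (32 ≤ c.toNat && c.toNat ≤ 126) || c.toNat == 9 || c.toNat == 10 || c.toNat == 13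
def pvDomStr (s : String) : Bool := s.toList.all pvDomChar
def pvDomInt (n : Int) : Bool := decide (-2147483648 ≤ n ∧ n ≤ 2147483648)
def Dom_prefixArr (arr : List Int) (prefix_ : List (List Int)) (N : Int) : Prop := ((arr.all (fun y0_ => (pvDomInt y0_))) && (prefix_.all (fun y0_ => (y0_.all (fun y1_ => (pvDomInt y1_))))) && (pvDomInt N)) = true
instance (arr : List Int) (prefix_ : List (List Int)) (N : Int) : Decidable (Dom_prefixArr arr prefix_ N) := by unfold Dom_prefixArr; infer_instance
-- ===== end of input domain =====

-- B replaces A's in-place prefix[i-1] recurrence with a divide-and-conquer computation of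
-- the (max,min)-prefix pairs plus a separate write pass (alternative decomposition;
-- equivalence is about the return value — both Pythons mutate the prefix rows in place).

-- ===== PORT A =====
-- prefix[i][j] (read) and prefix[i][j] = v (write), as A's Python performs them
def pvCell (p : List (List Int)) (i j : Int) : Int :=
  PySem.List.pyGetD (PySem.List.pyGetD p i []) j 0

def pvSetCell (p : List (List Int)) (i j : Int) (v : Int) : List (List Int) :=
  PySem.List.pySetD p i (PySem.List.pySetD (PySem.List.pyGetD p i []) j v)

def prefixArr (arr : List Int) (prefix_ : List (List Int)) (N : Int) : List (List Int) :=
  (PySem.List.pyRange 0 N 1).foldl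
    (fun p i =>
      if i = 0 then
        let p1 := pvSetCell p i 0 (PySem.List.pyGetD arr i 0)
        pvSetCell p1 i 1 (PySem.List.pyGetD arr i 0)
      else
        let p1 := pvSetCell p i 0 (max (pvCell p (i - 1) 0) (PySem.List.pyGetD arr i 0))
        pvSetCell p1 i 1 (min (pvCell p1 (i - 1) 1) (PySem.List.pyGetD arr i 0)))
    prefix_

-- ===== PORT B =====
-- Source B's recursive helper pm: (max,min)-prefix pairs of a block by divide and conquer.
-- left[-1] is ported as pyGetD … (-1) (0,0): left is never empty there (mid ≥ 1).
def pvPm (t : List Int) : List (Int × Int) :=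
  if _h : t.length ≤ 1 then t.map (fun x => (x, x))
  else
    let mid := t.length / 2
    let left := pvPm (t.take mid)
    let right := pvPm (t.drop mid)
    let s := PySem.List.pyGetD left (-1) ((0 : Int), (0 : Int))
    left ++ right.map (fun pr => (max s.1 pr.1, min s.2 pr.2))
termination_by t.length
decreasing_by
  · simp only [List.length_take]; omega
  · simp only [List.length_drop]; omega

def prefixArr_alt (arr : List Int) (prefix_ : List (List Int)) (N : Int) : List (List Int) :=
  let vals := pvPm (PySem.List.slice arr none (some N))
  (PySem.List.pyRange 0 N 1).foldl
    (fun p i =>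
      let p1 := pvSetCell p i 0 (PySem.List.pyGetD vals i ((0 : Int), (0 : Int))).1
      pvSetCell p1 i 1 (PySem.List.pyGetD vals i ((0 : Int), (0 : Int))).2)
    prefix_

-- ===== PRECONDITION & SPEC =====
-- Pre_ excludes exactly the inputs on which A raises IndexError: N above the length of arr
-- or of prefix, or a touched row of prefix shorter than 2.
def Pre_prefixArr (arr : List Int) (prefix_ : List (List Int)) (N : Int) : Prop :=
  N ≤ (arr.length : Int) ∧ N ≤ (prefix_.length : Int) ∧
    ∀ k, k < N.toNat → 2 ≤ (prefix_.getD k []).length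

instance (arr : List Int) (prefix_ : List (List Int)) (N : Int) : Decidable (Pre_prefixArr arr prefix_ N) := by
  unfold Pre_prefixArr; infer_instance

def pvWitness_prefixArr : List Int × List (List Int) × Int :=
  ([3, 1, 4], [[0, 0], [0, 0], [0, 0]], 3)

def Spec_prefixArr (arr : List Int) (prefix_ : List (List Int)) (N : Int) (out : List (List Int)) : Prop := out = prefixArr_alt arr prefix_ N
instance (arr : List Int) (prefix_ : List (List Int)) (N : Int) (out : List (List Int)) : Decidable (Spec_prefixArr arr prefix_ N out) := by unfold Spec_prefixArr; infer_instance

-- ===== CLAIM (what is proved, stated in full; the proofs are below) =====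
def Claim_equal_prefixArr : Prop := ∀ (arr : List Int) (prefix_ : List (List Int)) (N : Int), Dom_prefixArr arr prefix_ N → Pre_prefixArr arr prefix_ N → Spec_prefixArr arr prefix_ N (prefixArr arr prefix_ N)

-- ===== LEMMAS AND PROOFS =====

-- running max / min over the first k+1 elements
def rmx (arr : List Int) (k : Nat) : Int := (arr.take (k + 1)).foldl max (arr.getD 0 0)
def rmn (arr : List Int) (k : Nat) : Int := (arr.take (k + 1)).foldl min (arr.getD 0 0)

-- the common write sequence both loops perform
def goSpec (arr : List Int) (p : List (List Int)) : Nat → List (List Int)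
  | 0 => p
  | n + 1 =>
      let q := goSpec arr p n
      q.set n (((q.getD n []).set 0 (rmx arr n)).set 1 (rmn arr n))

lemma length_goSpec (arr : List Int) (p : List (List Int)) (n : Nat) :
    (goSpec arr p n).length = p.length := by
  induction n with
  | zero => rfl
  | succ n ih => simp [goSpec, ih]

lemma goSpec_getD_ge (arr : List Int) (p : List (List Int)) {n k : Nat} (h : n ≤ k) :
    (goSpec arr p n).getD k [] = p.getD k [] := by
  induction n with
  | zero => rfl
  | succ n ih =>
      simp only [goSpec]
      rw [List.getD_eq_getElem?_getD, List.getElem?_set_ne (by omega),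
        ← List.getD_eq_getElem?_getD, ih (by omega)]

lemma goSpec_getD_lt (arr : List Int) (p : List (List Int)) {n k : Nat}
    (hk : k < n) (hn : n ≤ p.length) :
    (goSpec arr p n).getD k [] = ((p.getD k []).set 0 (rmx arr k)).set 1 (rmn arr k) := by
  induction n with
  | zero => omega
  | succ n ih =>
      simp only [goSpec]
      by_cases hkn : k = n
      · subst hkn
        rw [List.getD_eq_getElem?_getD,
          List.getElem?_set_self (by rw [length_goSpec]; omega), Option.getD_some,
          goSpec_getD_ge arr p le_rfl]
      · rw [List.getD_eq_getElem?_getD, List.getElem?_set_ne (by omega),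
          ← List.getD_eq_getElem?_getD, ih (by omega) (by omega)]

lemma row_getD_zero (row : List Int) (a b : Int) (h : 1 ≤ row.length) :
    ((row.set 0 a).set 1 b).getD 0 0 = a := by
  rw [List.getD_eq_getElem?_getD, List.getElem?_set_ne (by omega),
    List.getElem?_set_self (by omega), Option.getD_some]

lemma row_getD_one (row : List Int) (a b : Int) (h : 2 ≤ row.length) :
    ((row.set 0 a).set 1 b).getD 1 0 = b := by
  rw [List.getD_eq_getElem?_getD, List.getElem?_set_self (by simp; omega), Option.getD_some]

lemma setCell_eq (p : List (List Int)) (i j : Int) (v : Int) (hi : 0 ≤ i) (hj : 0 ≤ j) :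
    pvSetCell p i j v = p.set i.toNat ((p.getD i.toNat []).set j.toNat v) := by
  simp [pvSetCell, PySem.List.pySetD_of_nonneg, PySem.List.pyGetD_of_nonneg, hi, hj]

lemma setCell2_eq (p : List (List Int)) (i : Int) (v0 v1 : Int) (hi : 0 ≤ i)
    (hk : i.toNat < p.length) :
    pvSetCell (pvSetCell p i 0 v0) i 1 v1
      = p.set i.toNat (((p.getD i.toNat []).set 0 v0).set 1 v1) := by
  rw [setCell_eq p i 0 v0 hi (by norm_num), setCell_eq _ i 1 v1 hi (by norm_num)]
  simp [List.getD_eq_getElem?_getD, List.getElem?_set_self hk, List.set_set]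

lemma pvCell_eq (p : List (List Int)) (i j : Int) (hi : 0 ≤ i) (hj : 0 ≤ j) :
    pvCell p i j = (p.getD i.toNat []).getD j.toNat 0 := by
  simp [pvCell, PySem.List.pyGetD_of_nonneg, hi, hj]

lemma getD_set_ne' (q : List (List Int)) (i j : Nat) (r : List Int) (h : i ≠ j) :
    (q.set i r).getD j [] = q.getD j [] := by
  rw [List.getD_eq_getElem?_getD, List.getElem?_set_ne h, ← List.getD_eq_getElem?_getD]

lemma rmx_zero (arr : List Int) (h : 0 < arr.length) : rmx arr 0 = arr.getD 0 0 := by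
  cases arr with
  | nil => simp at h
  | cons x xs => simp [rmx]

lemma rmn_zero (arr : List Int) (h : 0 < arr.length) : rmn arr 0 = arr.getD 0 0 := by
  cases arr with
  | nil => simp at h
  | cons x xs => simp [rmn]

lemma rmx_succ (arr : List Int) (n : Nat) (h : n + 1 < arr.length) :
    rmx arr (n + 1) = max (rmx arr n) (arr.getD (n + 1) 0) := by
  have : arr.take (n + 1 + 1) = arr.take (n + 1) ++ [arr.getD (n + 1) 0] := by
    rw [List.take_add_one]
    congr 1
    rw [List.getElem?_eq_getElem h]
    simp [List.getD_eq_getElem?_getD, List.getElem?_eq_getElem h]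
  rw [rmx, this, List.foldl_append]
  rfl

lemma rmn_succ (arr : List Int) (n : Nat) (h : n + 1 < arr.length) :
    rmn arr (n + 1) = min (rmn arr n) (arr.getD (n + 1) 0) := by
  have : arr.take (n + 1 + 1) = arr.take (n + 1) ++ [arr.getD (n + 1) 0] := by
    rw [List.take_add_one]
    congr 1
    rw [List.getElem?_eq_getElem h]
    simp [List.getD_eq_getElem?_getD, List.getElem?_eq_getElem h]
  rw [rmn, this, List.foldl_append]
  rfl

-- the A-side loop computes exactly goSpec
lemma Afold (arr : List Int) (p : List (List Int)) :
    ∀ n : Nat, (n : Int) ≤ arr.length → n ≤ p.length →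
      (∀ k, k < n → 2 ≤ (p.getD k []).length) →
      prefixArr arr p (n : Int) = goSpec arr p n := by
  intro n
  induction n with
  | zero =>
      intro _ _ _
      norm_num [prefixArr, PySem.List.pyRange_one_eq_nil (le_refl (0 : Int)), goSpec]
  | succ n ih =>
      intro ha hp hr
      have hcast : ((n + 1 : Nat) : Int) = (n : Int) + 1 := by push_cast; ring
      have ih' := ih (by push_cast at ha ⊢; omega) (by omega) (fun k hk => hr k (by omega))
      simp only [prefixArr] at ih' ⊢
      rw [hcast, PySem.List.pyRange_one_succ_right (Int.natCast_nonneg n), List.foldl_append, ih']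
      simp only [List.foldl_cons, List.foldl_nil]
      set q := goSpec arr p n with hq
      have hql : q.length = p.length := length_goSpec arr p n
      by_cases hn0 : n = 0
      · subst hn0
        rw [if_pos (by norm_num)]
        have h1 : 0 < arr.length := by push_cast at ha; omega
        rw [PySem.List.pyGetD_natCast,
          setCell2_eq _ _ _ _ (Int.natCast_nonneg 0) (by rw [Int.toNat_natCast, hql]; omega)]
        simp [goSpec, hq, rmx_zero arr h1, rmn_zero arr h1]
      · obtain ⟨m, rfl⟩ : ∃ m, n = m + 1 := ⟨n - 1, by omega⟩
        rw [if_neg (by omega)]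
        have hm : ((m + 1 : Nat) : Int) - 1 = ((m : Nat) : Int) := by push_cast; ring
        have hrow : q.getD m [] =
            ((p.getD m []).set 0 (rmx arr m)).set 1 (rmn arr m) :=
          goSpec_getD_lt arr p (by omega) (by omega)
        have hlen2 : 2 ≤ (p.getD m []).length := hr m (by omega)
        have hc0 : pvCell q (((m + 1 : Nat) : Int) - 1) 0 = rmx arr m := by
          rw [hm, pvCell_eq _ _ _ (Int.natCast_nonneg m) (by norm_num)]
          simp only [Int.toNat_natCast, Int.toNat_zero]
          rw [hrow, row_getD_zero _ _ _ (by omega)]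
        rw [hc0, PySem.List.pyGetD_natCast]
        have hc1 : ∀ V : Int,
            pvCell (pvSetCell q ((m + 1 : Nat) : Int) 0 V) (((m + 1 : Nat) : Int) - 1) 1
              = rmn arr m := by
          intro V
          rw [setCell_eq q _ _ _ (Int.natCast_nonneg _) (by norm_num), hm,
            pvCell_eq _ _ _ (Int.natCast_nonneg m) (by norm_num)]
          simp only [Int.toNat_natCast, Int.toNat_zero, Int.toNat_one]
          rw [getD_set_ne' _ _ _ _ (by omega), hrow, row_getD_one _ _ _ (by omega)]
        rw [hc1,
          setCell2_eq _ _ _ _ (Int.natCast_nonneg _) (by rw [Int.toNat_natCast, hql]; omega)]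
        simp only [goSpec, Int.toNat_natCast, hq]
        rw [rmx_succ arr m (by push_cast at ha; omega), rmn_succ arr m (by push_cast at ha; omega)]

lemma foldl_max_max (l : List Int) : ∀ a b : Int, l.foldl max (max a b) = max a (l.foldl max b) := by
  induction l with
  | nil => intro a b; rfl
  | cons x xs ih =>
      intro a b
      simp only [List.foldl_cons, max_assoc, ih]

lemma foldl_min_min (l : List Int) : ∀ a b : Int, l.foldl min (min a b) = min a (l.foldl min b) := by
  induction l with
  | nil => intro a b; rfl
  | cons x xs ih =>
      intro a b
      simp only [List.foldl_cons, min_assoc, ih]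

lemma rmx_take (arr : List Int) (n k : Nat) (hk : k < n) (hn : n ≤ arr.length) :
    rmx (arr.take n) k = rmx arr k := by
  unfold rmx
  rw [List.take_take, min_eq_left (by omega)]
  congr 1
  cases arr with
  | nil => simp
  | cons x xs => cases n with
    | zero => omega
    | succ m => simp

lemma rmn_take (arr : List Int) (n k : Nat) (hk : k < n) (hn : n ≤ arr.length) :
    rmn (arr.take n) k = rmn arr k := by
  unfold rmn
  rw [List.take_take, min_eq_left (by omega)]
  congr 1
  cases arr with
  | nil => simp
  | cons x xs => cases n with
    | zero => omega
    | succ m => simp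

-- rmx/rmn on an append, left part: they only see the prefix
lemma rmx_append_left (L R : List Int) (k : Nat) (_hL : L ≠ []) (hk : k < L.length) :
    rmx (L ++ R) k = rmx L k := by
  have := rmx_take (L ++ R) L.length k hk (by simp)
  rw [List.take_left] at this
  exact this.symm

lemma rmn_append_left (L R : List Int) (k : Nat) (_hL : L ≠ []) (hk : k < L.length) :
    rmn (L ++ R) k = rmn L k := by
  have := rmn_take (L ++ R) L.length k hk (by simp)
  rw [List.take_left] at this
  exact this.symm

-- rmx/rmn on an append, right part: total of the left combined with the right's running value
lemma rmx_append_right (L R : List Int) (j : Nat) (hL : L ≠ []) (hj : j < R.length) :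
    rmx (L ++ R) (L.length + j) = max (rmx L (L.length - 1)) (rmx R j) := by
  obtain ⟨r0, rs, rfl⟩ : ∃ r0 rs, R = r0 :: rs := by
    cases R with
    | nil => simp at hj
    | cons a b => exact ⟨a, b, rfl⟩
  have hhead : (L ++ r0 :: rs).getD 0 0 = L.getD 0 0 := by
    cases L with
    | nil => exact absurd rfl hL
    | cons a b => rfl
  have htake : (L ++ r0 :: rs).take (L.length + j + 1) = L ++ (r0 :: rs).take (j + 1) := by
    rw [Nat.add_assoc, List.take_append]
    congr 1
    · exact List.take_of_length_le (by omega)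
    · congr 1
      omega
  have hLfull : L.take (L.length - 1 + 1) = L := by
    rw [Nat.sub_add_cancel (by cases L; exact absurd rfl hL; simp)]
    exact List.take_length
  unfold rmx
  rw [htake, hhead, List.foldl_append, hLfull]
  simp only [List.take_succ_cons, List.foldl_cons, List.getD_cons_zero]
  rw [foldl_max_max, max_self]

lemma rmn_append_right (L R : List Int) (j : Nat) (hL : L ≠ []) (hj : j < R.length) :
    rmn (L ++ R) (L.length + j) = min (rmn L (L.length - 1)) (rmn R j) := by
  obtain ⟨r0, rs, rfl⟩ : ∃ r0 rs, R = r0 :: rs := by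
    cases R with
    | nil => simp at hj
    | cons a b => exact ⟨a, b, rfl⟩
  have hhead : (L ++ r0 :: rs).getD 0 0 = L.getD 0 0 := by
    cases L with
    | nil => exact absurd rfl hL
    | cons a b => rfl
  have htake : (L ++ r0 :: rs).take (L.length + j + 1) = L ++ (r0 :: rs).take (j + 1) := by
    rw [Nat.add_assoc, List.take_append]
    congr 1
    · exact List.take_of_length_le (by omega)
    · congr 1
      omega
  have hLfull : L.take (L.length - 1 + 1) = L := by
    rw [Nat.sub_add_cancel (by cases L; exact absurd rfl hL; simp)]
    exact List.take_length
  unfold rmn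
  rw [htake, hhead, List.foldl_append, hLfull]
  simp only [List.take_succ_cons, List.foldl_cons, List.getD_cons_zero]
  rw [foldl_min_min, min_self]

-- the divide-and-conquer helper computes exactly the (rmx, rmn) table
lemma pvPm_eq (t : List Int) :
    pvPm t = (List.range t.length).map (fun k => (rmx t k, rmn t k)) := by
  induction t using pvPm.induct with
  | case1 t h =>
      rw [pvPm, dif_pos h]
      interval_cases hl : t.length
      · rw [List.eq_nil_of_length_eq_zero hl]; rfl
      · obtain ⟨x, rfl⟩ : ∃ x, t = [x] := by
          cases t with
          | nil => simp at hl
          | cons a b =>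
              cases b with
              | nil => exact ⟨a, rfl⟩
              | cons c d => simp at hl
        simp [rmx, rmn, List.range_succ]
  | case2 t h midv ihL ihR =>
      rw [pvPm, dif_neg h]
      show pvPm (t.take (t.length / 2)) ++
          ((pvPm (t.drop (t.length / 2))).map (fun pr =>
            (max (PySem.List.pyGetD (pvPm (t.take (t.length / 2))) (-1) ((0 : Int), (0 : Int))).1 pr.1,
             min (PySem.List.pyGetD (pvPm (t.take (t.length / 2))) (-1) ((0 : Int), (0 : Int))).2 pr.2)))
          = (List.range t.length).map (fun k => (rmx t k, rmn t k))
      have hlen : 2 ≤ t.length := by omega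
      set n := t.length with hn
      set mid := n / 2 with hmid
      have hmid1 : 1 ≤ mid := by omega
      have hmidlt : mid < n := by omega
      set L := t.take mid with hLdef
      set R := t.drop mid with hRdef
      have hLlen : L.length = mid := by simp [hLdef]; omega
      have hRlen : R.length = n - mid := by simp [hRdef]; omega
      have hLne : L ≠ [] := by
        intro hc; rw [hc] at hLlen; simp at hLlen; omega
      have hLR : L ++ R = t := List.take_append_drop mid t
      -- last element of pvPm L is the pair of totals of L
      have hlast : PySem.List.pyGetD (pvPm L) (-1) ((0 : Int), (0 : Int))
          = (rmx L (mid - 1), rmn L (mid - 1)) := by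
        rw [ihL]
        have hne : (List.range L.length).map (fun k => (rmx L k, rmn L k)) ≠ [] := by
          simp [hLlen]; omega
        rw [PySem.List.pyGetD_neg_one _ _ hne, List.getLast_eq_getElem]
        simp only [List.getElem_map, List.length_map, List.length_range, List.getElem_range]
        rw [hLlen]
      rw [hlast, ihL, ihR]
      have hsplit : List.range n = List.range mid ++ (List.range (n - mid)).map (mid + ·) := by
        rw [show n = mid + (n - mid) by omega] ; rw [List.range_add]
        simp
      rw [hsplit, List.map_append]
      simp only [List.map_map]
      congr 1
      · rw [hLlen]
        apply List.map_congr_left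
        intro k hk
        simp only [List.mem_range] at hk
        rw [← hLR, rmx_append_left L R k hLne (by omega),
          rmn_append_left L R k hLne (by omega)]
      · rw [hRlen]
        apply List.map_congr_left
        intro j hj
        simp only [List.mem_range] at hj
        simp only [Function.comp_apply]
        rw [← hLR, ← hLlen, rmx_append_right L R j hLne (by omega),
          rmn_append_right L R j hLne (by omega)]

-- the write loop of B computes goSpec whenever its pair list carries (rmx, rmn)
lemma writeFold (arr : List Int) (vs : List (Int × Int)) :
    ∀ (n : Nat) (p : List (List Int)), n ≤ p.length →
      (∀ k, k < n → vs.getD k ((0 : Int), (0 : Int)) = (rmx arr k, rmn arr k)) →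
      (PySem.List.pyRange 0 (n : Int) 1).foldl
        (fun p i =>
          let p1 := pvSetCell p i 0 (PySem.List.pyGetD vs i ((0 : Int), (0 : Int))).1
          pvSetCell p1 i 1 (PySem.List.pyGetD vs i ((0 : Int), (0 : Int))).2) p
        = goSpec arr p n := by
  intro n
  induction n with
  | zero =>
      intro p _ _
      norm_num [PySem.List.pyRange_one_eq_nil (le_refl (0 : Int)), goSpec]
  | succ n ih =>
      intro p hp hv
      have hcast : ((n + 1 : Nat) : Int) = (n : Int) + 1 := by push_cast; ring
      rw [hcast, PySem.List.pyRange_one_succ_right (Int.natCast_nonneg n), List.foldl_append,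
        ih p (by omega) (fun k hk => hv k (by omega))]
      simp only [List.foldl_cons, List.foldl_nil]
      rw [PySem.List.pyGetD_natCast, hv n (by omega),
        setCell2_eq _ _ _ _ (Int.natCast_nonneg n)
          (by simp [length_goSpec]; omega)]
      simp [goSpec]

lemma Bfold (arr : List Int) (p : List (List Int)) (n : Nat)
    (ha : (n : Int) ≤ arr.length) (hp : n ≤ p.length) :
    prefixArr_alt arr p (n : Int) = goSpec arr p n := by
  have ht : PySem.List.slice arr none (some (n : Int)) = arr.take n := by
    rw [PySem.List.slice_to _ (Int.natCast_nonneg n)]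
    simp
  have hlen : (arr.take n).length = n := by
    simp
    omega
  have hvals : ∀ k, k < n →
      (pvPm (arr.take n)).getD k ((0 : Int), (0 : Int)) = (rmx arr k, rmn arr k) := by
    intro k hk
    rw [pvPm_eq, hlen, PySem.List.getD_map_range _ _ _ _ (by omega),
      rmx_take arr n k hk (by omega), rmn_take arr n k hk (by omega)]
  simp only [prefixArr_alt, ht]
  exact writeFold arr (pvPm (arr.take n)) n p hp hvals

-- ===== VERDICT (by name: the statement is the Claim_ definition above) =====
theorem prefixArr_spec : Claim_equal_prefixArr := by
  intro arr p N _ hpre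
  obtain ⟨ha, hp, hrows⟩ := hpre
  unfold Spec_prefixArr
  by_cases hN : 0 ≤ N
  · have hNeq : N = (N.toNat : Int) := (Int.toNat_of_nonneg hN).symm
    rw [hNeq, Afold arr p N.toNat (by omega) (by omega) hrows,
      Bfold arr p N.toNat (by omega) (by omega)]
  · have h0 : PySem.List.pyRange 0 N 1 = [] := PySem.List.pyRange_one_eq_nil (by omega)
    simp [prefixArr, prefixArr_alt, h0]
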